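-- pv_equiv track=rewrite | github.com/uipath-practice/AgenticPracticeCourse | scripts/context_resolver.py | _extract_section_heading
-- ===== SOURCE A (Python) =====
-- def _extract_section_heading(markdown: str, image_name: str) -> str:
--     """Find the heading under which an image appears."""
--     lines = markdown.splitlines()
--     last_heading = ""
--     for line in lines:
--         stripped = line.strip()
--         if stripped.startswith("#"):
--             last_heading = stripped.lstrip("#").strip()
--         if image_name in stripped:
--             return last_heading
--     return last_heading
-- ===== SOURCE B (Python) =====
-- def _extract_section_heading(markdown: str, image_name: str) -> str:
--     """Locate the first image line, then scan backward from it for the nearest heading."""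
--     lines = markdown.splitlines()
--     cut = len(lines)
--     for i, line in enumerate(lines):
--         if image_name in line.strip():
--             cut = i + 1  # keep the image line itself: a heading line containing the image counts
--             break
--     for line in reversed(lines[:cut]):
--         s = line.strip()
--         if s.startswith("#"):
--             return s.lstrip("#").strip()
--     return ""
-- ===== Notes on version B (the rewrite author's own statement) =====
-- stated objective: alternative
-- what changed: A threads a last-heading accumulator through one forward scan with an early return; B first locates the first image line, then scans backward from it (inclusive) for the nearest heading and normalizes only that one line.
import Mathlib
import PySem

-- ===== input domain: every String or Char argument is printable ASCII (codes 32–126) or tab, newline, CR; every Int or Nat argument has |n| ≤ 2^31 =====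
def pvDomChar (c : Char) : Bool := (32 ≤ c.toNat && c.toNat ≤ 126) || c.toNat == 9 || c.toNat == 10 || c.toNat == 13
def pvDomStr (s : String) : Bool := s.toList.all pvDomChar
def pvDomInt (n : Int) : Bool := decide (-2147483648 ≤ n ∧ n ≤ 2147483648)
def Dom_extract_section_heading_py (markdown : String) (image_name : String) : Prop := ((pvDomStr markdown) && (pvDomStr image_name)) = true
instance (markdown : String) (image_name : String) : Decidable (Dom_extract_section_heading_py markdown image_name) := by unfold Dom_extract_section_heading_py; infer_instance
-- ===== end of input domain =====

-- B locates the first image line and scans backward from it for the nearest heading,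
-- instead of A's forward scan threading a last-heading accumulator (objective: alternative decomposition).

-- s.lstrip("#"): drops leading '#' characters; exact since the chars argument is the single char '#'
def pvLstripHash (s : String) : String := String.ofList (s.toList.dropWhile (· == '#'))

-- ===== PORT A =====
-- the for-loop of A: state = last_heading; early return on the image test
def pvGoA (image_name : String) : List String → String → String
  | [], last_heading => last_heading
  | line :: rest, last_heading =>
    let stripped := PySem.Str.strip line
    let last_heading' :=
      if PySem.Str.startswith stripped "#" then PySem.Str.strip (pvLstripHash stripped)
      else last_heading
    if PySem.Str.isIn image_name stripped then last_heading'
    else pvGoA image_name rest last_heading'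

def extract_section_heading_py (markdown : String) (image_name : String) : String :=
  pvGoA image_name (PySem.Str.splitlines markdown) ""

-- ===== PORT B =====
-- first loop of Source B: index of the first line whose stripped text contains the image, if any
def pvFindImg (image_name : String) : List String → Option Nat
  | [] => none
  | line :: rest =>
    if PySem.Str.isIn image_name (PySem.Str.strip line) then some 0
    else (pvFindImg image_name rest).map (· + 1)

-- second loop of Source B: over the reversed prefix, return the first heading found (normalized)
def pvBackHeading : List String → Option String
  | [] => none
  | line :: rest =>
    let s := PySem.Str.strip line
    if PySem.Str.startswith s "#" then some (PySem.Str.strip (pvLstripHash s))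
    else pvBackHeading rest

def extract_section_heading_py_alt (markdown : String) (image_name : String) : String :=
  let lines := PySem.Str.splitlines markdown
  let cut := match pvFindImg image_name lines with
    | some i => i + 1
    | none => lines.length
  (pvBackHeading (lines.take cut).reverse).getD ""

-- ===== PRECONDITION & SPEC =====
def Spec_extract_section_heading_py (markdown : String) (image_name : String) (out : String) : Prop := out = extract_section_heading_py_alt markdown image_name
instance (markdown : String) (image_name : String) (out : String) : Decidable (Spec_extract_section_heading_py markdown image_name out) := by unfold Spec_extract_section_heading_py; infer_instance

-- ===== CLAIM (what is proved, stated in full; the proofs are below) =====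
def Claim_equal_extract_section_heading_py : Prop := ∀ (markdown : String) (image_name : String), Dom_extract_section_heading_py markdown image_name → Spec_extract_section_heading_py markdown image_name (extract_section_heading_py markdown image_name)

-- ===== LEMMAS AND PROOFS =====

-- the backward scan over xs ++ [l] prefers a heading in xs, else looks at l
theorem pvBackHeading_append_singleton (xs : List String) (l : String) :
    pvBackHeading (xs ++ [l]) = (pvBackHeading xs).or (pvBackHeading [l]) := by
  induction xs with
  | nil => simp only [List.nil_append, pvBackHeading, Option.none_or]
  | cons x xs ih =>
    simp only [List.cons_append, pvBackHeading]
    by_cases hx : PySem.Str.startswith (PySem.Str.strip x) "#" = true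
    · rw [if_pos hx, if_pos hx, Option.some_or]
    · rw [if_neg hx, if_neg hx, ih]
      simp only [pvBackHeading]

-- cut of Source B as a function of the line list
def pvCut (image_name : String) (lines : List String) : Nat :=
  match pvFindImg image_name lines with
  | some i => i + 1
  | none => lines.length

theorem pvCut_cons (image_name l : String) (ls : List String) :
    pvCut image_name (l :: ls) =
      if PySem.Str.isIn image_name (PySem.Str.strip l) then 1
      else pvCut image_name ls + 1 := by
  unfold pvCut
  simp only [pvFindImg]
  split_ifs with h
  · rfl
  · cases hf : pvFindImg image_name ls <;> simp

-- loop invariant: A's scan with accumulator acc equals B's backward scan with default acc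
theorem pvGoA_eq (image_name : String) (ls : List String) (acc : String) :
    pvGoA image_name ls acc =
      (pvBackHeading (ls.take (pvCut image_name ls)).reverse).getD acc := by
  induction ls generalizing acc with
  | nil => simp [pvGoA, pvCut, pvFindImg, pvBackHeading]
  | cons l ls ih =>
    rw [pvCut_cons]
    by_cases himg : PySem.Str.isIn image_name (PySem.Str.strip l)
    · simp only [himg, if_true, pvGoA, List.take_succ_cons, List.take_zero,
        List.reverse_cons, List.reverse_nil, List.nil_append, pvBackHeading]
      split_ifs <;> simp
    · rw [if_neg himg]
      simp only [pvGoA, himg, Bool.false_eq_true, if_false, List.take_succ_cons,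
        List.reverse_cons]
      rw [pvBackHeading_append_singleton, ih]
      cases hb : pvBackHeading (ls.take (pvCut image_name ls)).reverse with
      | some h => simp
      | none =>
        simp only [Option.none_or, pvBackHeading]
        split_ifs with hh <;> simp

-- ===== VERDICT (by name: the statement is the Claim_ definition above) =====
theorem extract_section_heading_py_spec : Claim_equal_extract_section_heading_py := by
  intro markdown image_name _
  unfold Spec_extract_section_heading_py extract_section_heading_py extract_section_heading_py_alt
  rw [pvGoA_eq]
  rfl
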